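-- pv_equiv track=rewrite | github.com/Nattapong-top/Learning-Python | Python101_Pythonic/08-Basic-Dict/ex08_03_for_k_in_a_dict_02.py | invert_unique
-- ===== SOURCE A (Python) =====
-- def invert_unique(d:dict):
--     """
--     d เป็น dict {key: value}
--
--     คืน dict ใหม่ที่สลับ key กับ value
--     เฉพาะคู่ที่ value ไม่ซ้ำกันเท่านั้น
--     """
--     # นับก่อน เพื่อรู้ว่าใครซ้ำ → แล้วค่อยวนอีกรอบเพื่อ “เลือกเฉพาะที่ไม่ซ้ำ”
--     count = {}
--     for v in d.values():
--         count[v] = count.get(v, 0) + 1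
--
--     new_d = {}
--     for key, val in d.items():
--         if count[val] == 1:
--             new_d[val] = key
--     return new_d
-- ===== SOURCE B (Python) =====
-- def invert_unique(d: dict):
--     seen = set()
--     new_d = {}
--     for key, val in d.items():
--         if val in seen:
--             new_d.pop(val, None)
--         else:
--             seen.add(val)
--             new_d[val] = key
--     return new_d
-- ===== Notes on version B (the rewrite author's own statement) =====
-- stated objective: alternative
-- what changed: Replaces the two-pass count-then-filter (build a value counter, then rescan keeping pairs whose value count is 1) with a single pass that maintains a seen-set and the answer dict directly, popping an entry the moment its value recurs.
import Mathlib
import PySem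

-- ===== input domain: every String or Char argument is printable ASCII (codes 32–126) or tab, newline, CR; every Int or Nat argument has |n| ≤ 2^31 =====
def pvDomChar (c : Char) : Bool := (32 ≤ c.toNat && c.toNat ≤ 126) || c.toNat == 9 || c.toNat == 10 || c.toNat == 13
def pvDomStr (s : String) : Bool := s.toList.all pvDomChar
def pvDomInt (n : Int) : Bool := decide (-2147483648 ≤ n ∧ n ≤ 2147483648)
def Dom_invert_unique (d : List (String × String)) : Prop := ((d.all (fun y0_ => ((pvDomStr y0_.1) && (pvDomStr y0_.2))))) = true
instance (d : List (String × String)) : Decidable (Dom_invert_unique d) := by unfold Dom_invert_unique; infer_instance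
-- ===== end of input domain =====

-- B replaces A's two passes (count values, then filter) by one pass keeping a seen-set and
-- the answer dict, popping an entry when its value recurs; same cost, different decomposition.


-- ===== PORT A =====
def invert_unique (d : List (String × String)) : List (String × String) :=
  -- count = {}; for v in d.values(): count[v] = count.get(v, 0) + 1
  let count : PySem.Dict String Int :=
    (d.map (·.2)).foldl (fun c v => c.insert v (c.getD v 0 + 1)) PySem.Dict.empty
  -- new_d = {}; for key, val in d.items(): if count[val] == 1: new_d[val] = key
  let new_d : PySem.Dict String String :=
    d.foldl (fun nd kv => if count.getD kv.2 0 == 1 then nd.insert kv.2 kv.1 else nd)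
      PySem.Dict.empty
  new_d.items

-- ===== PORT B =====
def invert_unique_alt (d : List (String × String)) : List (String × String) :=
  -- seen = set(); new_d = {}; one pass: pop on a repeated value, else record it
  let st :=
    d.foldl
      (fun (st : PySem.Set String × PySem.Dict String String) kv =>
        if PySem.Set.contains st.1 kv.2 then (st.1, st.2.erase kv.2)
        else (PySem.Set.add st.1 kv.2, st.2.insert kv.2 kv.1))
      (PySem.Set.empty, PySem.Dict.empty)
  st.2.items

-- ===== PRECONDITION & SPEC =====
-- Pre_ requires pairwise-distinct keys: A's parameter is a Python dict, which cannot carry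
-- duplicate keys, so association lists with repeated keys do not represent any input of A.
def Pre_invert_unique (d : List (String × String)) : Prop := (d.map Prod.fst).Nodup
instance (d : List (String × String)) : Decidable (Pre_invert_unique d) := by
  unfold Pre_invert_unique; infer_instance
def pvWitness_invert_unique : (List (String × String)) :=
  [("a", "1"), ("b", "2"), ("c", "1")]
def Spec_invert_unique (d : List (String × String)) (out : List (String × String)) : Prop := out = invert_unique_alt d
instance (d : List (String × String)) (out : List (String × String)) : Decidable (Spec_invert_unique d out) := by unfold Spec_invert_unique; infer_instance

-- ===== CLAIM (what is proved, stated in full; the proofs are below) =====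
def Claim_equal_invert_unique : Prop := ∀ (d : List (String × String)), Dom_invert_unique d → Pre_invert_unique d → Spec_invert_unique d (invert_unique d)

-- ===== LEMMAS AND PROOFS =====

-- the common characterisation of both results: the pairs of l whose value occurs exactly
-- once in the value multiset c, swapped, in order
def pvKeep (c : List String) (l : List (String × String)) : List (String × String) :=
  (l.filter (fun x => c.count x.2 == 1)).map (fun x => (x.2, x.1))

theorem pvKeep_fresh (c : List String) (l : List (String × String)) (v : String)
    (hv : v ∉ l.map (·.2)) :
    (PySem.Dict.mk (κ := String) (ν := String) (pvKeep c l)).contains v = false := by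
  rw [PySem.Dict.contains_eq_decide_mem_keys]
  simp only [decide_eq_false_iff_not, PySem.Dict.keys_mk, pvKeep, List.map_map]
  intro hmem
  obtain ⟨x, hx, hxv⟩ := List.mem_map.1 hmem
  exact hv (hxv ▸ List.mem_map_of_mem (List.mem_of_mem_filter hx))

theorem pvA_inv (d : List (String × String)) :
    ∀ (l : List (String × String)), l.Sublist d →
      (l.foldl
        (fun nd kv =>
          if ((d.map (·.2)).foldl (fun c v => c.insert v (c.getD v 0 + 1))
                (PySem.Dict.empty : PySem.Dict String Int)).getD kv.2 0 == 1
          then nd.insert kv.2 kv.1 else nd)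
        (PySem.Dict.empty : PySem.Dict String String))
      = PySem.Dict.mk (pvKeep (d.map (·.2)) l) := by
  intro l
  induction l using List.reverseRecOn with
  | nil => intro _; rfl
  | append_singleton l kv ih =>
    intro hsub
    have hl : l.Sublist d := ((l.sublist_append_left [kv]).trans hsub)
    rw [List.foldl_append, ih hl]
    simp only [List.foldl_cons, List.foldl_nil]
    have hcnt : ((d.map (·.2)).foldl (fun c v => c.insert v (c.getD v 0 + 1))
        (PySem.Dict.empty : PySem.Dict String Int)).getD kv.2 0
        = ((d.map (·.2)).count kv.2 : Int) := by
      rw [PySem.Dict.getD_foldl_insert_add_one]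
      simp
    simp only [hcnt]
    by_cases h1 : (d.map (·.2)).count kv.2 = 1
    · -- kept: the key kv.2 is fresh in the accumulated dict
      have hvals : ((l ++ [kv]).map (·.2)).Sublist (d.map (·.2)) := hsub.map _
      have hvnot : kv.2 ∉ l.map (·.2) := by
        intro hmem
        have h2 : 2 ≤ ((l ++ [kv]).map (·.2)).count kv.2 := by
          rw [List.map_append, List.count_append]
          have h0 : 0 < (l.map (·.2)).count kv.2 := List.count_pos_iff.2 hmem
          have h01 : ([kv].map (·.2)).count kv.2 = 1 := by simp
          omega
        have := h2.trans (hvals.count_le kv.2)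
        omega
      have hcond : ((((d.map (·.2)).count kv.2 : Int)) == 1) = true := by simp [h1]
      simp only [hcond, if_true]
      apply PySem.Dict.ext
      rw [PySem.Dict.items_insert_of_not_contains _ _ (pvKeep_fresh _ _ _ hvnot)]
      show pvKeep (d.map (·.2)) l ++ [(kv.2, kv.1)] = pvKeep (d.map (·.2)) (l ++ [kv])
      simp [pvKeep, List.filter_append, h1]
    · have hcond : ((((d.map (·.2)).count kv.2 : Int)) == 1) = false := by
        rw [beq_eq_false_iff_ne]
        exact_mod_cast h1
      simp only [hcond, Bool.false_eq_true, if_false]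
      congr 1
      simp [pvKeep, List.filter_append, h1]

theorem pvB_inv (l : List (String × String)) :
    (l.foldl
      (fun (st : PySem.Set String × PySem.Dict String String) kv =>
        if PySem.Set.contains st.1 kv.2 then (st.1, st.2.erase kv.2)
        else (PySem.Set.add st.1 kv.2, st.2.insert kv.2 kv.1))
      (PySem.Set.empty, PySem.Dict.empty))
    = (PySem.Set.ofList (l.map (·.2)),
       PySem.Dict.mk (pvKeep (l.map (·.2)) l)) := by
  induction l using List.reverseRecOn with
  | nil => rfl
  | append_singleton l kv ih =>
    rw [List.foldl_append, ih]
    simp only [List.foldl_cons, List.foldl_nil]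
    by_cases hv : kv.2 ∈ l.map (·.2)
    · -- repeated value: pop it from the answer
      have hc : PySem.Set.contains (PySem.Set.ofList (l.map (·.2))) kv.2 = true := by
        rw [PySem.Set.contains_iff, PySem.Set.mem_ofList]; exact hv
      rw [if_pos hc]
      have hset : PySem.Set.ofList ((l ++ [kv]).map (·.2))
          = PySem.Set.ofList (l.map (·.2)) := by
        rw [List.map_append]
        simp only [List.map_cons, List.map_nil]
        rw [PySem.Set.ofList_append_singleton,
          PySem.Set.add_of_mem (by rw [PySem.Set.mem_ofList]; exact hv)]
      have hcnt2 : 2 ≤ ((l ++ [kv]).map (·.2)).count kv.2 := by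
        rw [List.map_append, List.count_append]
        have h0 : 0 < (l.map (·.2)).count kv.2 := List.count_pos_iff.2 hv
        have h01 : ([kv].map (·.2)).count kv.2 = 1 := by simp
        omega
      refine Prod.ext hset.symm ?_
      apply PySem.Dict.ext
      show (pvKeep (l.map (·.2)) l).filter (fun p => !(p.1 == kv.2))
          = pvKeep ((l ++ [kv]).map (·.2)) (l ++ [kv])
      have hpkv : ((((l ++ [kv]).map (·.2)).count kv.2 == 1)) = false := by
        rw [beq_eq_false_iff_ne]
        omega
      rw [pvKeep, pvKeep, List.filter_map, List.filter_append]
      rw [show [kv].filter (fun x => ((l ++ [kv]).map (·.2)).count x.2 == 1) = [] by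
        simp only [List.filter_cons, List.filter_nil, hpkv, Bool.false_eq_true, if_false]]
      rw [List.append_nil, List.filter_filter]
      congr 1
      apply List.filter_congr
      intro x hx
      by_cases hxv : x.2 = kv.2
      · have hfalse : ((((l ++ [kv]).map (·.2)).count x.2 == 1)) = false := by
          rw [beq_eq_false_iff_ne, hxv]
          omega
        have hpos : 0 < (l.map (·.2)).count kv.2 := List.count_pos_iff.2 hv
        simp [hxv]
        omega
      · have h0 : ([kv].map (·.2)).count x.2 = 0 := by
          simp only [List.map_cons, List.map_nil]
          exact List.count_eq_zero.2 (by simp [hxv])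
        have hcx : ((l ++ [kv]).map (·.2)).count x.2 = (l.map (·.2)).count x.2 := by
          rw [List.map_append, List.count_append]
          simp only [List.map_cons, List.map_nil] at h0 ⊢
          omega
        have h00 : List.count x.2 [kv.2] = 0 := List.count_eq_zero.2 (by simp [hxv])
        simp [hxv, h00]
    · -- fresh value: record it
      have hc : PySem.Set.contains (PySem.Set.ofList (l.map (·.2))) kv.2 = false := by
        rw [← Bool.not_eq_true, PySem.Set.contains_iff, PySem.Set.mem_ofList]
        intro hmem
        exact hv hmem
      rw [if_neg (by rw [hc]; exact Bool.false_ne_true)]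
      have hset : PySem.Set.add (PySem.Set.ofList (l.map (·.2))) kv.2
          = PySem.Set.ofList ((l ++ [kv]).map (·.2)) := by
        rw [List.map_append]
        simp only [List.map_cons, List.map_nil]
        rw [PySem.Set.ofList_append_singleton]
      refine Prod.ext hset ?_
      apply PySem.Dict.ext
      rw [PySem.Dict.items_insert_of_not_contains _ _ (pvKeep_fresh _ _ _ hv)]
      show pvKeep (l.map (·.2)) l ++ [(kv.2, kv.1)]
          = pvKeep ((l ++ [kv]).map (·.2)) (l ++ [kv])
      have hl0 : (l.map (·.2)).count kv.2 = 0 := List.count_eq_zero.2 hv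
      have hck : ((l ++ [kv]).map (·.2)).count kv.2 = 1 := by
        rw [List.map_append, List.count_append]
        have h01 : ([kv].map (·.2)).count kv.2 = 1 := by simp
        omega
      have hckb : ((((l ++ [kv]).map (·.2)).count kv.2 == 1)) = true := by
        simp only [beq_iff_eq]
        exact hck
      rw [pvKeep, pvKeep, List.filter_append, List.map_append]
      congr 1
      · congr 1
        apply List.filter_congr
        intro x hx
        have hxv : x.2 ≠ kv.2 := fun h => hv (h ▸ List.mem_map_of_mem hx)
        have h0 : ([kv].map (·.2)).count x.2 = 0 := by
          simp only [List.map_cons, List.map_nil]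
          exact List.count_eq_zero.2 (by simp [hxv])
        have hcx : ((l ++ [kv]).map (·.2)).count x.2 = (l.map (·.2)).count x.2 := by
          rw [List.map_append, List.count_append]
          simp only [List.map_cons, List.map_nil] at h0 ⊢
          omega
        rw [hcx]
      · rw [show [kv].filter (fun x => ((l ++ [kv]).map (·.2)).count x.2 == 1) = [kv] by
          simp only [List.filter_cons, List.filter_nil, hckb, if_true]]
        simp

-- ===== VERDICT (by name: the statement is the Claim_ definition above) =====
theorem invert_unique_spec : Claim_equal_invert_unique := by
  intro d _ _
  unfold Spec_invert_unique
  simp only [invert_unique, invert_unique_alt]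
  rw [pvA_inv d d (List.Sublist.refl d), pvB_inv d]
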